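-- pv_equiv track=rewrite | github.com/marcusmai1401/PVCFC_API_LLM | app/rag/normalizers/text_normalizer.py | _protect_tables
-- ===== SOURCE A (Python) =====
-- def _protect_tables(text: str) -> tuple:
--     """
--     Protect table formatting from normalization
--
--     Args:
--         text: Input text
--
--     Returns:
--         (text with placeholders, list of (placeholder, original) pairs)
--     """
--     protected = []
--
--     # Simple heuristic: lines with multiple | or tab-separated values
--     lines = text.split('\n')
--     in_table = False
--     table_lines = []
--     result_lines = []
--
--     for line in lines:
--         # Check if line looks like table
--         if '|' in line and line.count('|') >= 2:
--             in_table = True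
--             table_lines.append(line)
--         elif in_table and (not line.strip() or '---' in line):
--             # Table separator or empty line in table
--             table_lines.append(line)
--         elif in_table:
--             # End of table
--             if table_lines:
--                 placeholder = f"__TABLE_{len(protected)}__"
--                 protected.append((placeholder, '\n'.join(table_lines)))
--                 result_lines.append(placeholder)
--                 table_lines = []
--             in_table = False
--             result_lines.append(line)
--         else:
--             result_lines.append(line)
--
--     # Handle remaining table lines
--     if table_lines:
--         placeholder = f"__TABLE_{len(protected)}__"
--         protected.append((placeholder, '\n'.join(table_lines)))
--         result_lines.append(placeholder)
--
--     return '\n'.join(result_lines), protected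
-- ===== SOURCE B (Python) =====
-- def _protect_tables(text: str) -> tuple:
--     """Scan-ahead re-implementation: instead of a boolean in_table state carried
--     through one interleaved loop, consume each table block in one go — on a table
--     line, scan forward over the whole run of table/continuation lines, emit one
--     placeholder for the run, and resume after it."""
--     lines = text.split('\n')
--
--     def table(l):
--         return '|' in l and l.count('|') >= 2
--
--     def cont(l):
--         return not l.strip() or '---' in l
--
--     protected = []
--     out = []
--     rest = lines
--     while rest:
--         l = rest[0]
--         if table(l):
--             k = 1
--             while k < len(rest) and (table(rest[k]) or cont(rest[k])):
--                 k += 1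
--             ph = f"__TABLE_{len(protected)}__"
--             protected.append((ph, '\n'.join(rest[:k])))
--             out.append(ph)
--             rest = rest[k:]
--         else:
--             out.append(l)
--             rest = rest[1:]
--     return '\n'.join(out), protected
-- ===== Notes on version B (the rewrite author's own statement) =====
-- stated objective: alternative
-- what changed: Replaced A's single interleaved loop carrying an in_table boolean and a pending table_lines buffer (flushed on the next non-table line or at EOF) by a scan-ahead structure: on a table line, consume the whole run of table/continuation lines at once and emit its placeholder immediately, so no boolean state or pending buffer is carried between iterations.
import Mathlib
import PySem

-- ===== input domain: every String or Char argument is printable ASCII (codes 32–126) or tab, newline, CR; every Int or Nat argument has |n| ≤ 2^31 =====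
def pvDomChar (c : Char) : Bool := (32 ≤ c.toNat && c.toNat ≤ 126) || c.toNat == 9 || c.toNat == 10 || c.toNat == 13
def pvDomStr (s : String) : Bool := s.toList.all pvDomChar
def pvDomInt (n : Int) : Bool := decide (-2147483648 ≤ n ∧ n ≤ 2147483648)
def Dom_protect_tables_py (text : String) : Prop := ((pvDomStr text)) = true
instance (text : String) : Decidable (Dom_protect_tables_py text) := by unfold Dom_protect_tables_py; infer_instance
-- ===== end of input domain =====

-- B replaces A's interleaved boolean-state loop by a scan-ahead block consumer; same cost, different decomposition.

-- shared helpers: the line predicates and placeholder text both Pythons write verbatim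
def pvTable (l : String) : Bool :=
  PySem.Str.isIn "|" l && decide (2 ≤ PySem.Str.count l "|")       -- '|' in l and l.count('|') >= 2

def pvCont (l : String) : Bool :=
  (PySem.Str.strip l == "") || PySem.Str.isIn "---" l              -- not l.strip() or '---' in l

def pvMkPh (n : Nat) : String := "__TABLE_" ++ PySem.Int.toStr (n : Int) ++ "__"   -- f"__TABLE_{n}__"

-- text.split('\n'): sep "\n" ≠ "" so split? never returns none
def pvSplitLines (text : String) : List String := (PySem.Str.split? text "\n").getD []

-- ===== PORT A =====
-- A's loop body: state = (protected, in_table, table_lines, result_lines)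
def pvStepA (st : (List (String × String)) × Bool × List String × List String)
    (line : String) : (List (String × String)) × Bool × List String × List String :=
  let prot := st.1; let in_table := st.2.1; let table_lines := st.2.2.1; let result_lines := st.2.2.2
  if pvTable line then
    (prot, true, table_lines ++ [line], result_lines)
  else if in_table && pvCont line then
    (prot, in_table, table_lines ++ [line], result_lines)
  else if in_table then
    if table_lines ≠ [] then
      (prot ++ [(pvMkPh prot.length, PySem.Str.join "\n" table_lines)], false, [],
       result_lines ++ [pvMkPh prot.length] ++ [line])
    else
      (prot, false, table_lines, result_lines ++ [line])
  else
    (prot, in_table, table_lines, result_lines ++ [line])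

-- A's trailing flush and return
def pvFinishA (st : (List (String × String)) × Bool × List String × List String) :
    String × (List (String × String)) :=
  let prot := st.1; let table_lines := st.2.2.1; let result_lines := st.2.2.2
  if table_lines ≠ [] then
    (PySem.Str.join "\n" (result_lines ++ [pvMkPh prot.length]),
     prot ++ [(pvMkPh prot.length, PySem.Str.join "\n" table_lines)])
  else
    (PySem.Str.join "\n" result_lines, prot)

def protect_tables_py (text : String) : String × (List (String × String)) :=
  pvFinishA ((pvSplitLines text).foldl pvStepA ([], false, [], []))

-- ===== PORT B =====
-- B's scan-ahead loop over the remaining lines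
def pvGoB : List String → List (String × String) → List String → String × (List (String × String))
  | [], prot, out => (PySem.Str.join "\n" out, prot)
  | l :: ls, prot, out =>
    if pvTable l then
      let block := l :: ls.takeWhile (fun x => pvTable x || pvCont x)
      let rest := ls.dropWhile (fun x => pvTable x || pvCont x)
      let ph := pvMkPh prot.length
      pvGoB rest (prot ++ [(ph, PySem.Str.join "\n" block)]) (out ++ [ph])
    else
      pvGoB ls prot (out ++ [l])
termination_by lines _ _ => lines.length
decreasing_by
  · exact Nat.lt_succ_of_le (List.length_dropWhile_le _ _)
  · simp

def protect_tables_py_alt (text : String) : String × (List (String × String)) :=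
  pvGoB (pvSplitLines text) [] []

-- ===== PRECONDITION & SPEC =====
def Spec_protect_tables_py (text : String) (out : String × (List (String × String))) : Prop := out = protect_tables_py_alt text
instance (text : String) (out : String × (List (String × String))) : Decidable (Spec_protect_tables_py text out) := by unfold Spec_protect_tables_py; infer_instance

-- ===== CLAIM (what is proved, stated in full; the proofs are below) =====
def Claim_equal_protect_tables_py : Prop := ∀ (text : String), Dom_protect_tables_py text → Spec_protect_tables_py text (protect_tables_py text)

-- ===== LEMMAS AND PROOFS =====

-- In table state (in_table = true, buffer acc ≠ []), A absorbs exactly the run of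
-- table/continuation lines into acc and flushes on the first other line or at EOF.
lemma pv_tableA (lines : List String) : ∀ (acc : List String) (prot : List (String × String))
    (res : List String), acc ≠ [] →
    pvFinishA (lines.foldl pvStepA (prot, true, acc, res)) =
      (match lines.dropWhile (fun x => pvTable x || pvCont x) with
       | [] =>
         (PySem.Str.join "\n" (res ++ [pvMkPh prot.length]),
          prot ++ [(pvMkPh prot.length,
            PySem.Str.join "\n" (acc ++ lines.takeWhile (fun x => pvTable x || pvCont x)))])
       | o :: rest =>
         pvFinishA (rest.foldl pvStepA
           (prot ++ [(pvMkPh prot.length,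
              PySem.Str.join "\n" (acc ++ lines.takeWhile (fun x => pvTable x || pvCont x)))],
            false, [], res ++ [pvMkPh prot.length, o]))) := by
  induction lines with
  | nil =>
    intro acc prot res hacc
    simp [pvFinishA, hacc]
  | cons l ls ih =>
    intro acc prot res hacc
    by_cases hq : (pvTable l || pvCont l) = true
    · have hstep : pvStepA (prot, true, acc, res) l = (prot, true, acc ++ [l], res) := by
        rcases Bool.or_eq_true_iff.mp hq with ht | hc
        · simp [pvStepA, ht]
        · by_cases ht : pvTable l = true
          · simp [pvStepA, ht]
          · simp only [Bool.not_eq_true] at ht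
            simp [pvStepA, ht, hc]
      rw [List.foldl_cons, hstep, ih (acc ++ [l]) prot res (by simp)]
      rw [List.takeWhile_cons_of_pos (by simpa using hq), List.dropWhile_cons_of_pos (by simpa using hq)]
      simp
    · simp only [Bool.or_eq_true, not_or, Bool.not_eq_true] at hq
      obtain ⟨ht, hc⟩ := hq
      have hstep : pvStepA (prot, true, acc, res) l =
          (prot ++ [(pvMkPh prot.length, PySem.Str.join "\n" acc)], false, [],
           res ++ [pvMkPh prot.length] ++ [l]) := by
        simp [pvStepA, ht, hc, hacc]
      rw [List.foldl_cons, hstep]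
      rw [List.takeWhile_cons_of_neg (by simp [ht, hc]),
          List.dropWhile_cons_of_neg (by simp [ht, hc])]
      simp

-- Outside a table, A's remaining run equals B's scan-ahead loop.
lemma pv_main : ∀ (n : Nat) (lines : List String), lines.length ≤ n →
    ∀ (prot : List (String × String)) (res : List String),
    pvFinishA (lines.foldl pvStepA (prot, false, [], res)) = pvGoB lines prot res := by
  intro n
  induction n with
  | zero =>
    intro lines hlen prot res
    have : lines = [] := List.eq_nil_of_length_eq_zero (Nat.le_zero.mp hlen)
    subst this
    simp [pvFinishA, pvGoB]
  | succ n ih =>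
    intro lines hlen prot res
    cases lines with
    | nil => simp [pvFinishA, pvGoB]
    | cons l ls =>
      by_cases ht : pvTable l = true
      · have hstep : pvStepA (prot, false, [], res) l = (prot, true, [] ++ [l], res) := by
          simp [pvStepA, ht]
        rw [List.foldl_cons, hstep, pv_tableA ls ([] ++ [l]) prot res (by simp)]
        cases hd : ls.dropWhile (fun x => pvTable x || pvCont x) with
        | nil => simp [pvGoB, ht, hd]
        | cons o rest =>
          have hrest : rest.length ≤ n := by
            have h1 : (ls.dropWhile (fun x => pvTable x || pvCont x)).length ≤ ls.length :=
              List.length_dropWhile_le _ _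
            rw [hd] at h1
            simp at h1 hlen
            omega
          have ho : pvTable o = false := by
            have hne : ls.dropWhile (fun x => pvTable x || pvCont x) ≠ [] := by simp [hd]
            have h2 := List.head_dropWhile_not (fun x => pvTable x || pvCont x) hne
            simp only [hd] at hne h2
            simp only [List.head_cons, Bool.or_eq_false_iff] at h2
            exact h2.1
          simp [pvGoB, ht, ho, hd, ih rest hrest, List.append_assoc]
      · simp only [Bool.not_eq_true] at ht
        have hstep : pvStepA (prot, false, [], res) l = (prot, false, [], res ++ [l]) := by
          simp [pvStepA, ht]
        rw [List.foldl_cons, hstep, ih ls (by simp at hlen; omega)]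
        simp [pvGoB, ht]

-- ===== VERDICT (by name: the statement is the Claim_ definition above) =====
theorem protect_tables_py_spec : Claim_equal_protect_tables_py := by
  intro text _
  unfold Spec_protect_tables_py protect_tables_py protect_tables_py_alt
  exact pv_main (pvSplitLines text).length _ le_rfl [] []
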